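-- pv_equiv track=rewrite | github.com/Mokuichi147/SchemaForm | src/schemaform/repo_sqlite.py | _normalize_group_ids
-- ===== SOURCE A (Python) =====
-- from typing import Any
--
-- def _normalize_group_ids(value: Any) -> list[int]:
--     if not value:
--         return []
--     result: list[int] = []
--     seen: set[int] = set()
--     for item in value:
--         try:
--             gid = int(item)
--         except (TypeError, ValueError):
--             continue
--         if gid in seen:
--             continue
--         seen.add(gid)
--         result.append(gid)
--     return sorted(result)
-- ===== SOURCE B (Python) =====
-- from typing import Any
--
-- def _normalize_group_ids(value: Any) -> list[int]:
--     if not value: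
--         return []
--     ids: list[int] = []
--     for item in value:
--         try:
--             gid = int(item)
--         except (TypeError, ValueError):
--             continue
--         ids.append(gid)
--     ids.sort()
--     out: list[int] = []
--     for gid in ids:
--         if not out or gid != out[-1]:
--             out.append(gid)
--     return out
-- ===== Notes on version B (the rewrite author's own statement) =====
-- stated objective: alternative
-- what changed: Replaces A's hash-set first-occurrence dedup followed by a sort with sort-first then a single adjacency-based dedup sweep, using no set at all.
import Mathlib
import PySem

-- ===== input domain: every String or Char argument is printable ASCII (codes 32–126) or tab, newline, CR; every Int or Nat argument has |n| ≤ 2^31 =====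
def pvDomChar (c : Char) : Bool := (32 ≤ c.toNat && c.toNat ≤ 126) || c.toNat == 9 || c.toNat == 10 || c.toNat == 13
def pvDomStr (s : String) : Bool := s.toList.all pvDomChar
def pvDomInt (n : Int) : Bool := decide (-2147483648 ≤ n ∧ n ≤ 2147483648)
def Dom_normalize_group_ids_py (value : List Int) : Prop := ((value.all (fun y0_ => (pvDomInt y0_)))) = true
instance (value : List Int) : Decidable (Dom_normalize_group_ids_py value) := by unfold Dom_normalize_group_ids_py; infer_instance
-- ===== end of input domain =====

-- B replaces A's hash-set first-occurrence dedup + sort by sort-first then one adjacency-dedup sweep (no set); equal results, proved below.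


-- ===== PORT A =====
-- A: if empty return []; loop keeping (result, seen); int(item) on an int is the identity, so the try/except never fires; finally sorted(result).
def normalize_group_ids_py (value : List Int) : List Int :=
  if value = [] then []
  else
    let st := value.foldl (fun (st : List Int × PySem.Set Int) item =>
      let gid := item
      if PySem.Set.contains st.2 gid then st
      else (st.1 ++ [gid], PySem.Set.add st.2 gid)) ([], PySem.Set.empty)
    PySem.List.sorted st.1 (fun x => x) false

-- ===== PORT B =====
-- B: if empty return []; collect all ints (identity on int input), sort, then one adjacency-dedup sweep ('if not out or gid != out[-1]').
def normalize_group_ids_py_alt (value : List Int) : List Int :=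
  if value = [] then []
  else
    let ids := value
    let sortedIds := PySem.List.sorted ids (fun x => x) false
    sortedIds.foldl (fun (out : List Int) gid =>
      if out.getLast? = some gid then out else out ++ [gid]) []

-- ===== PRECONDITION & SPEC =====
def Spec_normalize_group_ids_py (value : List Int) (out : List Int) : Prop := out = normalize_group_ids_py_alt value
instance (value : List Int) (out : List Int) : Decidable (Spec_normalize_group_ids_py value out) := by unfold Spec_normalize_group_ids_py; infer_instance

-- ===== CLAIM (what is proved, stated in full; the proofs are below) =====
def Claim_equal_normalize_group_ids_py : Prop := ∀ (value : List Int), Dom_normalize_group_ids_py value → Spec_normalize_group_ids_py value (normalize_group_ids_py value)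

-- ===== LEMMAS AND PROOFS =====

-- recursive characterisation of B's sweep: carry the last appended element
def adjRec : Option Int → List Int → List Int
  | _, [] => []
  | p, x :: xs => if p = some x then adjRec p xs else x :: adjRec (some x) xs

theorem foldl_adj_eq (l : List Int) : ∀ acc : List Int,
    l.foldl (fun (out : List Int) gid =>
      if out.getLast? = some gid then out else out ++ [gid]) acc
      = acc ++ adjRec acc.getLast? l := by
  induction l with
  | nil => intro acc; simp [adjRec]
  | cons x xs ih =>
    intro acc
    by_cases h : acc.getLast? = some x
    · simp [List.foldl, h, adjRec, ih]
    · simp only [List.foldl, h, adjRec]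
      rw [ih]
      simp

-- the key lemma: on a ≤-sorted list, the sweep yields a <-sorted list with the expected members
theorem adjRec_some_props (l : List Int) :
    l.Pairwise (· ≤ ·) → ∀ v : Int, (∀ y ∈ l, v ≤ y) →
      (adjRec (some v) l).Pairwise (· < ·) ∧
      (∀ x, x ∈ adjRec (some v) l ↔ x ∈ l ∧ x ≠ v) ∧
      (∀ y ∈ adjRec (some v) l, v < y) := by
  induction l with
  | nil => intro _ v _; simp [adjRec]
  | cons x xs ih =>
    intro hs v hv
    have hxs : xs.Pairwise (· ≤ ·) := (List.pairwise_cons.1 hs).2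
    have hx_le : ∀ y ∈ xs, x ≤ y := (List.pairwise_cons.1 hs).1
    by_cases hvx : v = x
    · subst hvx
      have e : adjRec (some v) (v :: xs) = adjRec (some v) xs := by simp [adjRec]
      rw [e]
      obtain ⟨h1, h2, h3⟩ := ih hxs v (fun y hy => hv y (List.mem_cons_of_mem _ hy))
      refine ⟨h1, ?_, h3⟩
      intro z
      rw [h2]
      constructor
      · rintro ⟨hz, hne⟩; exact ⟨List.mem_cons_of_mem _ hz, hne⟩
      · rintro ⟨hz, hne⟩
        rcases List.mem_cons.1 hz with h | h
        · exact absurd h hne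
        · exact ⟨h, hne⟩
    · have hvx' : v < x := lt_of_le_of_ne (hv x List.mem_cons_self) (fun h => hvx h)
      have hsome : (some v) ≠ some x := by simp [hvx]
      simp only [adjRec, if_neg hsome]
      obtain ⟨h1, h2, h3⟩ := ih hxs x hx_le
      refine ⟨?_, ?_, ?_⟩
      · exact List.pairwise_cons.2 ⟨h3, h1⟩
      · intro z
        constructor
        · intro hz
          rcases List.mem_cons.1 hz with h | h
          · subst h; exact ⟨List.mem_cons_self, fun h => hvx h.symm⟩
          · obtain ⟨hz1, _⟩ := (h2 z).1 h
            have : x < z := h3 z h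
            exact ⟨List.mem_cons_of_mem _ hz1, by omega⟩
        · rintro ⟨hz, hne⟩
          rcases List.mem_cons.1 hz with h | h
          · subst h; exact List.mem_cons_self
          · by_cases hzx : z = x
            · subst hzx; exact List.mem_cons_self
            · exact List.mem_cons_of_mem _ ((h2 z).2 ⟨h, hzx⟩)
      · intro y hy
        rcases List.mem_cons.1 hy with h | h
        · omega
        · have := h3 y h; omega

theorem adjRec_none_props (l : List Int) (hs : l.Pairwise (· ≤ ·)) :
    (adjRec none l).Pairwise (· < ·) ∧ (∀ x, x ∈ adjRec none l ↔ x ∈ l) := by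
  cases l with
  | nil => simp [adjRec]
  | cons x xs =>
    have hxs : xs.Pairwise (· ≤ ·) := (List.pairwise_cons.1 hs).2
    have hx_le : ∀ y ∈ xs, x ≤ y := (List.pairwise_cons.1 hs).1
    obtain ⟨h1, h2, h3⟩ := adjRec_some_props xs hxs x hx_le
    have hne : (none : Option Int) ≠ some x := by simp
    simp only [adjRec, if_neg hne]
    refine ⟨List.pairwise_cons.2 ⟨h3, h1⟩, ?_⟩
    intro z
    constructor
    · intro hz
      rcases List.mem_cons.1 hz with h | h
      · subst h; exact List.mem_cons_self
      · exact List.mem_cons_of_mem _ ((h2 z).1 h).1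
    · intro hz
      rcases List.mem_cons.1 hz with h | h
      · subst h; exact List.mem_cons_self
      · by_cases hzx : z = x
        · subst hzx; exact List.mem_cons_self
        · exact List.mem_cons_of_mem _ ((h2 z).2 ⟨h, hzx⟩)

-- A's fold computes set(value) (as PySem.Set): both components equal the running set
theorem foldA_eq_ofList (l : List Int) : ∀ s : PySem.Set Int,
    (l.foldl (fun (st : List Int × PySem.Set Int) item =>
      let gid := item
      if PySem.Set.contains st.2 gid then st
      else (st.1 ++ [gid], PySem.Set.add st.2 gid)) (s, s))
      = (l.foldl PySem.Set.add s, l.foldl PySem.Set.add s) := by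
  induction l with
  | nil => intro s; rfl
  | cons x xs ih =>
    intro s
    by_cases h : PySem.Set.contains s x
    · have hadd : PySem.Set.add s x = s := by
        simp [PySem.Set.add]; exact (PySem.Set.contains_iff s x).1 h
      simp only [List.foldl, if_pos h, hadd]
      exact ih s
    · have hadd : PySem.Set.add s x = s ++ [x] := by
        simp [PySem.Set.add]; exact fun hm => h (((PySem.Set.contains_iff s x).2 hm))
      calc (List.foldl (fun (st : List Int × PySem.Set Int) item =>
              let gid := item
              if PySem.Set.contains st.2 gid then st
              else (st.1 ++ [gid], PySem.Set.add st.2 gid)) (s, s) (x :: xs))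
          = List.foldl (fun (st : List Int × PySem.Set Int) item =>
              let gid := item
              if PySem.Set.contains st.2 gid then st
              else (st.1 ++ [gid], PySem.Set.add st.2 gid))
              (PySem.Set.add s x, PySem.Set.add s x) xs := by
            simp only [List.foldl, if_neg h, hadd]
        _ = (List.foldl PySem.Set.add (PySem.Set.add s x) xs,
             List.foldl PySem.Set.add (PySem.Set.add s x) xs) := ih (PySem.Set.add s x)
        _ = _ := by simp [List.foldl]

-- ===== VERDICT (by name: the statement is the Claim_ definition above) =====
theorem normalize_group_ids_py_spec : Claim_equal_normalize_group_ids_py := by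
  intro value _
  unfold Spec_normalize_group_ids_py normalize_group_ids_py normalize_group_ids_py_alt
  by_cases hnil : value = []
  · simp [hnil]
  · simp only [if_neg hnil]
    have hA : (value.foldl (fun (st : List Int × PySem.Set Int) item =>
          let gid := item
          if PySem.Set.contains st.2 gid then st
          else (st.1 ++ [gid], PySem.Set.add st.2 gid)) ([], PySem.Set.empty)).1
        = value.foldl PySem.Set.add PySem.Set.empty :=
      congrArg Prod.fst (foldA_eq_ofList value PySem.Set.empty)
    have hofl : value.foldl PySem.Set.add PySem.Set.empty = PySem.Set.ofList value :=
      (PySem.Set.ofList_eq_foldl value).symm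
    have hsorted : (PySem.List.sorted value (fun x => x) false).Pairwise (· ≤ ·) :=
      PySem.List.sorted_pairwise value (fun x => x)
    obtain ⟨hlt, hmem⟩ := adjRec_none_props _ hsorted
    rw [hA, hofl, foldl_adj_eq]
    simp only [List.nil_append, List.getLast?_nil]
    -- sorted(set(value)) equals the adjacency-dedup of sorted(value)
    have hperm : (adjRec none (PySem.List.sorted value (fun x => x) false)).Perm
        (PySem.Set.ofList value) := by
      refine (List.perm_ext_iff_of_nodup ?_ ?_).2 ?_
      · exact (hlt.imp (fun h => ne_of_lt h))
      · exact PySem.Set.nodup_ofList value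
      · intro a
        rw [hmem a, PySem.List.mem_sorted, PySem.Set.mem_ofList]
    exact PySem.List.sorted_eq_of_perm_of_pairwise_lt _ _ _ hperm hlt
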